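-- pv_equiv track=rewrite | github.com/mifengac/yfjcgkzx | jingqing_fenxi/service/rising_incident_service.py | _current_rising_steps
-- ===== SOURCE A (Python) =====
-- from typing import Any, Dict, List, Mapping, Sequence, Tuple
--
-- def _current_rising_steps(counts: Sequence[int]) -> Tuple[int, int]:
--     steps = 0
--     for idx in range(len(counts) - 1, 0, -1):
--         if counts[idx] > counts[idx - 1]:
--             steps += 1
--             continue
--         break
--     return steps, len(counts) - 1
-- ===== SOURCE B (Python) =====
-- def _current_rising_steps(counts):
--     # Forward single pass over adjacent pairs with a resetting run counter:
--     # after the scan, run equals the length of the trailing strictly-increasing run.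
--     run = 0
--     for prev, cur in zip(counts, counts[1:]):
--         run = run + 1 if cur > prev else 0
--     return run, len(counts) - 1
-- ===== Notes on version B (the rewrite author's own statement) =====
-- stated objective: alternative
-- what changed: Replaced the backward index loop with early break by a forward fold over adjacent pairs that maintains a resetting run-length counter; no indexing and no break.
import Mathlib
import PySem

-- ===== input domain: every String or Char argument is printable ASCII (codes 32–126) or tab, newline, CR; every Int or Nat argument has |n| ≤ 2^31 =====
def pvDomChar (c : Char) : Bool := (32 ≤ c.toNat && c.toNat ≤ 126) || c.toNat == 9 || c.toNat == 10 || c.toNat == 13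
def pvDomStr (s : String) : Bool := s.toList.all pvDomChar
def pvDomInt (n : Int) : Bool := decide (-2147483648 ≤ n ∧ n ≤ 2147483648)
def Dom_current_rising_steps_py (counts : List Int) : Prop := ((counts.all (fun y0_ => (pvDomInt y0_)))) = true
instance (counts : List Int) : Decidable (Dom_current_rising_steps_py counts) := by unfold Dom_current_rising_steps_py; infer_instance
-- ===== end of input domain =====

-- B replaces A's backward index loop with early break by a forward fold over
-- adjacent pairs with a resetting run counter (objective: alternative; same value).

-- ===== PORT A =====
-- the 'for idx in range(len(counts)-1, 0, -1): … break' loop, step for step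
def pvAGo (counts : List Int) : List Int → Int → Int
  | [], steps => steps
  | idx :: rest, steps =>
    match PySem.List.pyGet? counts idx, PySem.List.pyGet? counts (idx - 1) with
    | some x, some y => if x > y then pvAGo counts rest (steps + 1) else steps
    | _, _ => steps  -- unreachable: every idx of range(len-1, 0, -1) is a valid index

def current_rising_steps_py (counts : List Int) : Int × Int :=
  (pvAGo counts (PySem.List.pyRange ((counts.length : Int) - 1) 0 (-1)) 0,
   (counts.length : Int) - 1)

-- ===== PORT B =====
-- 'for prev, cur in zip(counts, counts[1:]): run = run + 1 if cur > prev else 0'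
def current_rising_steps_py_alt (counts : List Int) : Int × Int :=
  let run := (counts.zip (PySem.List.slice counts (some 1) none)).foldl
    (fun run p => if p.2 > p.1 then run + 1 else 0) 0
  (run, (counts.length : Int) - 1)

-- ===== PRECONDITION & SPEC =====
def Spec_current_rising_steps_py (counts : List Int) (out : Int × Int) : Prop := out = current_rising_steps_py_alt counts
instance (counts : List Int) (out : Int × Int) : Decidable (Spec_current_rising_steps_py counts out) := by unfold Spec_current_rising_steps_py; infer_instance

-- ===== CLAIM (what is proved, stated in full; the proofs are below) =====
def Claim_equal_current_rising_steps_py : Prop := ∀ (counts : List Int), Dom_current_rising_steps_py counts → Spec_current_rising_steps_py counts (current_rising_steps_py counts)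

-- ===== LEMMAS AND PROOFS =====

-- early-stopping count of initial pairs with p.2 > p.1
def pvG : List (Int × Int) → Int
  | [] => 0
  | p :: rest => if p.2 > p.1 then 1 + pvG rest else 0

theorem pvFoldl_eq_pvG (l : List (Int × Int)) :
    l.foldl (fun run p => if p.2 > p.1 then run + 1 else 0) 0 = pvG l.reverse := by
  induction l using List.reverseRecOn with
  | nil => rfl
  | append_singleton l a ih =>
    simp [List.foldl_append, pvG, ih]
    split_ifs <;> omega

theorem pvAGo_eq_pvG (counts : List Int) (idxs : List Int) (steps : Int)
    (h : ∀ i ∈ idxs, 1 ≤ i ∧ i < (counts.length : Int)) :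
    pvAGo counts idxs steps =
      steps + pvG (idxs.map fun i =>
        (PySem.List.pyGetD counts (i - 1) 0, PySem.List.pyGetD counts i 0)) := by
  induction idxs generalizing steps with
  | nil => simp [pvAGo, pvG]
  | cons i rest ih =>
    obtain ⟨h1, h2⟩ := h i (by simp)
    have hx : PySem.List.pyGet? counts i = some (PySem.List.pyGetD counts i 0) := by
      rw [PySem.List.pyGet?_eq_some_getElem counts (i := i) (by omega) h2,
          PySem.List.pyGetD_eq_getElem counts (i := i) 0 (by omega) h2]
    have hy : PySem.List.pyGet? counts (i - 1) = some (PySem.List.pyGetD counts (i - 1) 0) := by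
      rw [PySem.List.pyGet?_eq_some_getElem counts (i := i - 1) (by omega) (by omega),
          PySem.List.pyGetD_eq_getElem counts (i := i - 1) 0 (by omega) (by omega)]
    simp only [pvAGo, hx, hy, List.map_cons, pvG]
    split_ifs with hc
    · rw [ih (steps + 1) (fun j hj => h j (by simp [hj]))]; omega
    · omega

theorem pvMap_range_eq_zip (counts : List Int) :
    ((PySem.List.pyRange 1 (counts.length : Int) 1).map fun i =>
        (PySem.List.pyGetD counts (i - 1) 0, PySem.List.pyGetD counts i 0)) =
      counts.zip counts.tail := by
  apply List.ext_getElem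
  · simp [PySem.List.length_pyRange_one]
  · intro k hk1 hk2
    have hlen : k < counts.length - 1 := by
      simpa [PySem.List.length_pyRange_one] using hk1
    simp only [List.getElem_map, PySem.List.getElem_pyRange_one, List.getElem_zip,
      List.getElem_tail]
    rw [show (1 : Int) + (k : Int) - 1 = ((k : Nat) : Int) by omega,
        show (1 : Int) + (k : Int) = (((k + 1 : Nat)) : Int) by omega,
        PySem.List.pyGetD_eq_getElem counts (i := ((k : Nat) : Int)) 0 (by omega)
          (by push_cast; omega),
        PySem.List.pyGetD_eq_getElem counts (i := (((k + 1 : Nat)) : Int)) 0 (by omega)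
          (by omega)]
    simp

-- ===== VERDICT (by name: the statement is the Claim_ definition above) =====
theorem current_rising_steps_py_spec : Claim_equal_current_rising_steps_py := by
  intro counts _
  unfold Spec_current_rising_steps_py current_rising_steps_py current_rising_steps_py_alt
  simp only [PySem.List.slice_from_one]
  refine Prod.ext ?_ rfl
  have hrng := PySem.List.pyRange_neg_one_eq_reverse ((counts.length : Int) - 1) 0
  rw [pvFoldl_eq_pvG, hrng, show (0 : Int) + 1 = 1 by omega,
      show (counts.length : Int) - 1 + 1 = (counts.length : Int) by omega]
  rw [pvAGo_eq_pvG counts _ 0 ?_]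
  · rw [List.map_reverse, pvMap_range_eq_zip]
    omega
  · intro i hi
    rw [List.mem_reverse, PySem.List.mem_pyRange_one] at hi
    omega
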